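-- pv_equiv track=rewrite | github.com/ArtemDavletov/EPAM_python_course | homework7/hw2.py | simplify_input_string
-- ===== SOURCE A (Python) =====
-- def pop_item(arr: list):
--     try:
--         return arr.pop()
--     except IndexError:
--         ...
--
-- def simplify_input_string(string: str):
--     ans = []
--
--     for i in string:
--         if i == "#":
--             pop_item(ans)
--         else:
--             ans.append(i)
--     return "".join(ans)
-- ===== SOURCE B (Python) =====
-- def simplify_input_string(string: str):
--     skip = 0
--     out = []
--     for ch in reversed(string):
--         if ch == "#":
--             skip += 1
--         elif skip:
--             skip -= 1
--         else:
--             out.append(ch)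
--     return "".join(reversed(out))
-- ===== Notes on version B (the rewrite author's own statement) =====
-- stated objective: alternative
-- what changed: Replaces the forward stack (append/pop) simulation with a right-to-left scan that keeps an integer deletion counter and collects surviving characters, reversing them at the end.
import Mathlib
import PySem

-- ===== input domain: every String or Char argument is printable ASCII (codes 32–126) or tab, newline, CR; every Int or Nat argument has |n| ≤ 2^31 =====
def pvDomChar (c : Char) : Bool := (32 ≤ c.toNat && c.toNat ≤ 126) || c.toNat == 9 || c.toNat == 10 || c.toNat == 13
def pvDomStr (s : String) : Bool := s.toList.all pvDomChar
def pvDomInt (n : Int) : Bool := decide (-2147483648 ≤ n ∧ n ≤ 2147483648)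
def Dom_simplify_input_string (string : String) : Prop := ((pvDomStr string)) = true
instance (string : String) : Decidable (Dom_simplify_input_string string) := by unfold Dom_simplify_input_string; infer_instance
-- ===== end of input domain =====

-- B replaces A's forward stack simulation with a right-to-left scan keeping a deletion
-- counter (same result, same O(n) cost; a genuinely different traversal strategy).

-- ===== PORT A =====
-- pop_item pops the last element, swallowing IndexError on []: dropLast is exactly that effect on the list.
def simplify_input_string (string : String) : String :=
  String.mk (string.toList.foldl (fun ans i => if i = '#' then ans.dropLast else ans ++ [i]) [])

-- ===== PORT B =====
-- loop over reversed(string) with skip counter, appending kept chars to out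
def simplifyAltGo : List Char → Nat → List Char → List Char
  | [], _, out => out
  | ch :: rest, skip, out =>
    if ch = '#' then simplifyAltGo rest (skip + 1) out
    else if skip > 0 then simplifyAltGo rest (skip - 1) out
    else simplifyAltGo rest skip (out ++ [ch])

def simplify_input_string_alt (string : String) : String :=
  String.mk (simplifyAltGo string.toList.reverse 0 []).reverse

-- ===== PRECONDITION & SPEC =====
def Spec_simplify_input_string (string : String) (out : String) : Prop := out = simplify_input_string_alt string
instance (string : String) (out : String) : Decidable (Spec_simplify_input_string string out) := by unfold Spec_simplify_input_string; infer_instance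

-- ===== CLAIM (what is proved, stated in full; the proofs are below) =====
def Claim_equal_simplify_input_string : Prop := ∀ (string : String), Dom_simplify_input_string string → Spec_simplify_input_string string (simplify_input_string string)

-- ===== LEMMAS AND PROOFS =====

-- A's stack fold, abbreviated
def aFold (l : List Char) : List Char :=
  l.foldl (fun ans i => if i = '#' then ans.dropLast else ans ++ [i]) []

-- B's kept characters (in processing order) without the accumulator
def keepGo : List Char → Nat → List Char
  | [], _ => []
  | ch :: rest, skip =>
    if ch = '#' then keepGo rest (skip + 1)
    else if skip > 0 then keepGo rest (skip - 1)
    else ch :: keepGo rest skip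

-- k pending pops applied to a stack
def popN : Nat → List Char → List Char
  | 0, x => x
  | k + 1, x => popN k x.dropLast

theorem simplifyAltGo_eq_keep : ∀ (l : List Char) (k : Nat) (acc : List Char),
    simplifyAltGo l k acc = acc ++ keepGo l k := by
  intro l
  induction l with
  | nil => intro k acc; simp [simplifyAltGo, keepGo]
  | cons c rest ih =>
    intro k acc
    by_cases hc : c = '#'
    · simp [simplifyAltGo, keepGo, hc, ih]
    · by_cases hk : k > 0
      · simp [simplifyAltGo, keepGo, hc, hk, ih]
      · simp [simplifyAltGo, keepGo, hc, hk, ih]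

theorem keep_rev : ∀ (l : List Char) (k : Nat),
    (keepGo l k).reverse = popN k (aFold l.reverse) := by
  intro l
  induction l with
  | nil => intro k; induction k with
    | zero => simp [keepGo, popN, aFold]
    | succ k ih => simpa [popN, aFold] using ih
  | cons c rest ih =>
    intro k
    have hfold : aFold (rest.reverse ++ [c])
        = (if c = '#' then (aFold rest.reverse).dropLast else aFold rest.reverse ++ [c]) := by
      simp [aFold, List.foldl_append]
    by_cases hc : c = '#'
    · subst hc
      simp only [keepGo, reduceIte, List.reverse_cons, hfold]
      rw [ih (k + 1)]
      rfl
    · by_cases hk : k > 0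
      · obtain ⟨k', rfl⟩ : ∃ k', k = k' + 1 := ⟨k - 1, by omega⟩
        simp only [keepGo, hc, reduceIte, hk, List.reverse_cons, hfold]
        rw [show k' + 1 - 1 = k' from rfl, ih k']
        simp [popN]
      · have hk0 : k = 0 := by omega
        subst hk0
        simp only [keepGo, if_neg hc, List.reverse_cons, hfold]
        simp [popN, ih 0, popN]

-- ===== VERDICT (by name: the statement is the Claim_ definition above) =====
theorem simplify_input_string_spec : Claim_equal_simplify_input_string := by
  intro s _
  show simplify_input_string s = simplify_input_string_alt s
  unfold simplify_input_string simplify_input_string_alt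
  rw [simplifyAltGo_eq_keep, List.nil_append, keep_rev, List.reverse_reverse]
  rfl
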